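-- pv_equiv track=rewrite | github.com/mahaelit/26-MPV | bib2csv.py | _comment_lines_before
-- ===== SOURCE A (Python) =====
-- def _comment_lines_before(text: str, pos: int) -> list:
--     """Sammelt zusammenhaengende '%'-Kommentarzeilen direkt vor *pos*.
--
--     Abbruch bei Leerzeile oder Nicht-Kommentarzeile.
--     """
--     lines: list = []
--     line_start = text.rfind("\n", 0, pos) + 1
--     while line_start > 0:
--         prev_end = line_start - 1
--         if prev_end < 0:
--             break
--         prev_start = text.rfind("\n", 0, prev_end) + 1
--         prev = text[prev_start:prev_end].strip()
--         if not prev: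
--             break                   # Leerzeile  ->  Ende des Blocks
--         if not prev.startswith("%"):
--             break                   # Code  ->  Ende
--         lines.insert(0, prev[1:].strip())
--         line_start = prev_start
--     return lines
-- ===== SOURCE B (Python) =====
-- def _comment_lines_before(text: str, pos: int) -> list:
--     """Forward one-pass: fold over the prefix up to pos's line start, keeping the
--     current run of '%'-comment lines and resetting it on any other line."""
--     line_start = text.rfind("\n", 0, pos) + 1
--     block = []
--     cur = ""
--     for ch in text[:line_start]:
--         if ch == "\n":
--             s = cur.strip()
--             if s.startswith("%"):
--                 block.append(s[1:].strip())
--             else: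
--                 block = []
--             cur = ""
--         else:
--             cur += ch
--     return block
-- ===== Notes on version B (the rewrite author's own statement) =====
-- stated objective: simpler
-- what changed: Replaces A's backward while-loop that repeatedly calls rfind and inserts at the front with a single forward fold over the prefix text[:line_start], accumulating the current line and keeping a run of comment lines that resets on any blank/non-comment line.
import Mathlib
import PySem

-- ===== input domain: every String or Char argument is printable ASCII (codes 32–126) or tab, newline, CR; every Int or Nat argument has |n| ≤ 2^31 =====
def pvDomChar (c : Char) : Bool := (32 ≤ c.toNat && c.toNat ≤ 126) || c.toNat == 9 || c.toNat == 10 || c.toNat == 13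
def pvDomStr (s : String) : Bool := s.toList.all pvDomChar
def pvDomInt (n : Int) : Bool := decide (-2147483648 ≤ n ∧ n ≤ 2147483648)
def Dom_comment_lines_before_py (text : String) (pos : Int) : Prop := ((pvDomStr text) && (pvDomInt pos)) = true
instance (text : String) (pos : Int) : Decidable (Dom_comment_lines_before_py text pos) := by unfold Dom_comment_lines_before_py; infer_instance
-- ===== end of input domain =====

-- B replaces A's backward rfind-loop with a single forward reset-fold over the prefix; objective: simpler.

-- ===== PORT A =====
-- literal transliteration of A's while-loop (state: lines, line_start); lines.insert(0, x) prepends.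
-- fuel is only a totality guard: each iteration strictly decreases line_start (prev_start ≤ line_start - 1),
-- so the initial fuel line_start.toNat + 1 is never exhausted.
def clbLoopA (s : List Char) (fuel : Nat) (lines : List (List Char)) (line_start : Int) : List (List Char) :=
  match fuel with
  | 0 => lines
  | fuel + 1 =>
    if 0 < line_start then
      let prev_end : Int := line_start - 1
      if prev_end < 0 then lines
      else
        let prev_start : Int := PySem.Chars.rfindFrom s ['\n'] 0 (some prev_end) + 1
        let prev := PySem.Chars.strip (PySem.Chars.slice s (some prev_start) (some prev_end))
        if prev = [] then lines
        else if ¬ PySem.Chars.startswith prev ['%'] then lines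
        else clbLoopA s fuel (PySem.Chars.strip (PySem.Chars.slice prev (some 1) none) :: lines) prev_start
    else lines

def comment_lines_before_py (text : String) (pos : Int) : List String :=
  let line_start : Int := PySem.Str.rfindFrom text "\n" 0 (some pos) + 1
  (clbLoopA text.toList (line_start.toNat + 1) [] line_start).map (fun l => String.ofList l)

-- ===== PORT B =====
-- one step of B's forward fold: state = (block, cur); a newline closes cur, other chars extend it
def clbStepB (st : List (List Char) × List Char) (ch : Char) : List (List Char) × List Char :=
  if ch = '\n' then
    let sLine := PySem.Chars.strip st.2
    if PySem.Chars.startswith sLine ['%'] then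
      (st.1 ++ [PySem.Chars.strip (PySem.Chars.slice sLine (some 1) none)], [])
    else ([], [])
  else (st.1, st.2 ++ [ch])

def comment_lines_before_py_alt (text : String) (pos : Int) : List String :=
  let line_start : Int := PySem.Str.rfindFrom text "\n" 0 (some pos) + 1
  let pref := PySem.Chars.slice text.toList none (some line_start)
  ((pref.foldl clbStepB ([], [])).1).map (fun l => String.ofList l)

-- ===== PRECONDITION & SPEC =====
def Spec_comment_lines_before_py (text : String) (pos : Int) (out : List String) : Prop := out = comment_lines_before_py_alt text pos
instance (text : String) (pos : Int) (out : List String) : Decidable (Spec_comment_lines_before_py text pos out) := by unfold Spec_comment_lines_before_py; infer_instance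

-- ===== CLAIM (what is proved, stated in full; the proofs are below) =====
def Claim_equal_comment_lines_before_py : Prop := ∀ (text : String) (pos : Int), Dom_comment_lines_before_py text pos → Spec_comment_lines_before_py text pos (comment_lines_before_py text pos)

-- ===== LEMMAS AND PROOFS =====

theorem clb_prefix_iff (l : List Char) (c : Char) (i : Nat) :
    [c].isPrefixOf (l.drop i) = true ↔ l[i]? = some c := by
  rw [List.isPrefixOf_iff_prefix]
  constructor
  · rintro ⟨t, ht⟩
    have h0 : (l.drop i)[0]? = some c := by rw [← ht]; rfl
    simpa [List.getElem?_drop] using h0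
  · intro h
    have h0 : (l.drop i)[0]? = some c := by simpa [List.getElem?_drop] using h
    cases hd : l.drop i with
    | nil => rw [hd] at h0; simp at h0
    | cons a t =>
      rw [hd] at h0; simp at h0
      exact ⟨t, by simp [h0]⟩

theorem clb_go_spec (l : List Char) (c : Char) (j : Nat) :
    PySem.Chars.rfind.go l [c] j = -1 ∨
      (0 ≤ PySem.Chars.rfind.go l [c] j ∧ (PySem.Chars.rfind.go l [c] j).toNat ≤ j ∧
        l[(PySem.Chars.rfind.go l [c] j).toNat]? = some c) := by
  induction j with
  | zero =>
    simp only [PySem.Chars.rfind.go]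
    by_cases h : [c].isPrefixOf l = true
    · right
      have := (clb_prefix_iff l c 0).mp (by simpa using h)
      simp [h, this]
    · left; simp [h]
  | succ j ih =>
    simp only [PySem.Chars.rfind.go]
    by_cases h : [c].isPrefixOf (l.drop (j+1)) = true
    · right
      rw [if_pos h]
      have hc := (clb_prefix_iff l c (j+1)).mp h
      refine ⟨by positivity, by simp, by simpa using hc⟩
    · simp only [h, if_false]
      rcases ih with h1 | ⟨h1, h2, h3⟩
      · left; exact h1
      · right; exact ⟨h1, by omega, h3⟩

theorem clb_go_max (l : List Char) (c : Char) (j : Nat) : ∀ i : Nat,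
    PySem.Chars.rfind.go l [c] j < (i : Int) → i ≤ j → l[i]? ≠ some c := by
  induction j with
  | zero =>
    intro i h1 h2
    interval_cases i
    simp only [PySem.Chars.rfind.go] at h1
    by_cases h : [c].isPrefixOf l = true
    · simp [h] at h1
    · intro hc
      exact h ((clb_prefix_iff l c 0).mpr (by simpa using hc))
  | succ j ih =>
    intro i h1 h2
    simp only [PySem.Chars.rfind.go] at h1
    by_cases h : [c].isPrefixOf (l.drop (j+1)) = true
    · simp [h] at h1; omega
    · simp only [h, if_false] at h1
      by_cases hij : i = j + 1
      · intro hc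
        exact h ((clb_prefix_iff l c (j+1)).mpr (hij ▸ hc))
      · exact ih i h1 (by omega)

-- full spec of rfindFrom s [c] 0 (some p): -1 or the LAST index of c below min p (len s)
theorem clb_rfindFrom_spec (s : List Char) (c : Char) (p : Int) :
    (-1 ≤ PySem.Chars.rfindFrom s [c] 0 (some p)) ∧
    (0 ≤ PySem.Chars.rfindFrom s [c] 0 (some p) →
      (PySem.Chars.rfindFrom s [c] 0 (some p) < (s.length : Int) ∧
       (0 ≤ p → PySem.Chars.rfindFrom s [c] 0 (some p) < p) ∧
       s[(PySem.Chars.rfindFrom s [c] 0 (some p)).toNat]? = some c)) ∧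
    (0 ≤ p → ∀ i : Nat, PySem.Chars.rfindFrom s [c] 0 (some p) < (i : Int) →
       (i : Int) < p → i < s.length → s[i]? ≠ some c) := by
  simp only [PySem.Chars.rfindFrom]
  set n : Int := (s.length : Int) with hn
  set e : Int := if n < p then n else if p < 0 then (if p + n < 0 then 0 else p + n) else p with he
  have hen : 0 ≤ e ∧ e ≤ n ∧ (0 ≤ p → e ≤ p) := by
    rw [he]; split_ifs <;> simp [hn] at * <;> omega
  have hst : (if (0:Int) < 0 then (if (0:Int) + n < 0 then 0 else 0 + n) else 0) = (0:Int) := by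
    norm_num
  rw [hst]
  have hlt : ¬ e < (0:Int) := by omega
  simp only [hlt, if_false]
  set l := List.drop (Int.toNat 0) (List.take e.toNat s) with hl
  have hll : l = List.take e.toNat s := by simp [hl]
  have hlen : l.length = e.toNat := by
    rw [hll]; simp; omega
  have hget : ∀ i : Nat, i < e.toNat → l[i]? = s[i]? := by
    intro i hi; rw [hll]; rw [List.getElem?_take_of_lt hi]
  rcases clb_go_spec l c l.length with hg | ⟨hg0, hg1, hg2⟩
  · simp only [PySem.Chars.rfind, hg]
    refine ⟨by norm_num, by norm_num, ?_⟩
    intro hp i hri hip hin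
    have hi : i < e.toNat := by
      have := hen.2.2 hp
      rw [he]; split_ifs <;> omega
    intro hc
    have := clb_go_max l c l.length i (by rw [hg]; omega) (by omega)
    rw [hget i hi] at this
    exact this hc
  · simp only [PySem.Chars.rfind]
    have hr : ¬ PySem.Chars.rfind.go l [c] l.length = -1 := by omega
    simp only [hr, if_false]
    set r := PySem.Chars.rfind.go l [c] l.length with hrdef
    obtain ⟨hrlen, -⟩ := List.getElem?_eq_some_iff.mp hg2
    refine ⟨by omega, ?_, ?_⟩
    · intro _
      refine ⟨by omega, by intro hp; have := hen.2.2 hp; omega, ?_⟩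
      have : (0 + r).toNat = r.toNat := by omega
      rw [this, ← hget r.toNat (by omega)]
      exact hg2
    · intro hp i hri hip hin
      have hi : i < e.toNat := by
        have := hen.2.2 hp
        rw [he]; split_ifs <;> omega
      intro hc
      have := clb_go_max l c l.length i (by omega) (by omega)
      rw [hget i hi] at this
      exact this hc

-- folding B's step over a newline-free list just extends cur
theorem clb_foldB_no_nl (mid : List Char) (b : List (List Char)) (cur : List Char)
    (h : '\n' ∉ mid) : mid.foldl clbStepB (b, cur) = (b, cur ++ mid) := by
  induction mid generalizing cur with
  | nil => simp
  | cons x xs ih =>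
    have hx : ¬ x = '\n' := fun hh => h (hh ▸ List.mem_cons_self)
    simp only [List.foldl_cons, clbStepB, if_neg hx]
    rw [ih _ (fun hh => h (List.mem_cons_of_mem _ hh))]
    simp

-- the crux: A's backward loop equals B's forward fold over the prefix take L s
theorem clb_main (s : List Char) (fuel : Nat) : ∀ (L : Int), L.toNat < fuel →
    (L = 0 ∨ (0 < L ∧ L.toNat ≤ s.length ∧ s[L.toNat - 1]? = some '\n')) →
    (∀ lines, clbLoopA s fuel lines L = ((s.take L.toNat).foldl clbStepB ([], [])).1 ++ lines) ∧
      ((s.take L.toNat).foldl clbStepB ([], [])).2 = [] := by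
  induction fuel with
  | zero => intro L hN; omega
  | succ fuel ih =>
    intro L hN hinv
    rcases hinv with hL0 | ⟨hL, hLn, hnl⟩
    · subst hL0
      constructor
      · intro lines
        simp [clbLoopA]
      · simp
    · set r := PySem.Chars.rfindFrom s ['\n'] 0 (some (L - 1)) with hrdef
      obtain ⟨hr1, hr2, hr3⟩ := clb_rfindFrom_spec s '\n' (L - 1)
      set P : Int := r + 1 with hPdef
      have hP0 : 0 ≤ P := by omega
      have hPL : P ≤ L - 1 := by
        rcases (by omega : 0 ≤ r ∨ r < 0) with h0 | h0
        · have := (hr2 h0).2.1 (by omega); omega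
        · omega
      set mid : List Char := (s.take (L-1).toNat).drop P.toNat with hmid
      have htak : s.take L.toNat = (s.take P.toNat ++ mid) ++ ['\n'] := by
        have h1 : s.take L.toNat = s.take (L.toNat - 1) ++ ['\n'] := by
          have : L.toNat = (L.toNat - 1) + 1 := by omega
          rw [this, List.take_add_one]
          have : L.toNat - 1 + 1 - 1 = L.toNat - 1 := by omega
          rw [this, hnl]
          rfl
        have h2 : s.take (L-1).toNat = s.take P.toNat ++ mid := by
          rw [hmid]
          have : s.take P.toNat = (s.take (L-1).toNat).take P.toNat := by
            rw [List.take_take]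
            congr 1
            omega
          rw [this, List.take_append_drop]
        have h3 : (L-1).toNat = L.toNat - 1 := by omega
        rw [h1, ← h3, h2]
      have hmidnl : '\n' ∉ mid := by
        intro hmem
        rw [hmid] at hmem
        obtain ⟨i, hi, hie⟩ := List.getElem_of_mem hmem
        have hi' : ((s.take (L-1).toNat).drop P.toNat)[i]? = some '\n' := by
          rw [List.getElem?_eq_getElem hi, hie]
        rw [List.getElem?_drop] at hi'
        obtain ⟨hlt, -⟩ := List.getElem?_eq_some_iff.mp hi'
        simp only [List.length_take] at hlt
        rw [List.getElem?_take_of_lt (by omega)] at hi'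
        exact hr3 (by omega) (P.toNat + i) (by omega) (by omega) (by omega) hi'
      have hslice : PySem.Chars.slice s (some P) (some (L-1)) = mid := by
        rw [PySem.Chars.slice_eq_listSlice, PySem.List.slice_toNat s hP0 (by omega), hmid]
        rw [List.drop_take]
      have hinvP : P = 0 ∨ (0 < P ∧ P.toNat ≤ s.length ∧ s[P.toNat - 1]? = some '\n') := by
        rcases (by omega : 0 ≤ r ∨ r < 0) with h0 | h0
        · right
          obtain ⟨ha, -, hc⟩ := hr2 h0
          refine ⟨by omega, by omega, ?_⟩
          have : P.toNat - 1 = r.toNat := by omega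
          rw [this]; exact hc
        · left; omega
      have ihP := ih P (by omega) hinvP
      have hfold : (s.take L.toNat).foldl clbStepB ([], []) =
          clbStepB (((s.take P.toNat).foldl clbStepB ([], [])).1, mid) '\n' := by
        rw [htak, List.foldl_append, List.foldl_append]
        have : (s.take P.toNat).foldl clbStepB ([], []) =
            (((s.take P.toNat).foldl clbStepB ([], [])).1, []) :=
          Prod.ext rfl ihP.2
        rw [this, clb_foldB_no_nl mid _ [] hmidnl]
        simp
      rw [hfold]
      constructor
      · intro lines
        show (if 0 < L then _ else lines) = _
        simp only [if_pos hL, if_neg (by omega : ¬ L - 1 < 0), ← hrdef, ← hPdef, hslice]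
        by_cases hemp : PySem.Chars.strip mid = []
        · rw [if_pos hemp]
          simp [clbStepB, hemp, PySem.Chars.startswith]
        · rw [if_neg hemp]
          by_cases hsw : PySem.Chars.startswith (PySem.Chars.strip mid) ['%'] = true
          · rw [if_neg (by simp [hsw])]
            rw [(ihP.1 _)]
            simp [clbStepB, hsw]
          · rw [if_pos (by simp [hsw])]
            simp [clbStepB, hsw]
      · by_cases hsw : PySem.Chars.startswith (PySem.Chars.strip mid) ['%'] = true
        · simp [clbStepB, hsw]
        · simp [clbStepB, hsw]

-- the invariant holds at the initial line_start computed by rfind(text, "\n", 0, pos) + 1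
theorem clb_init (s : List Char) (pos : Int) :
    let L := PySem.Chars.rfindFrom s ['\n'] 0 (some pos) + 1
    L = 0 ∨ (0 < L ∧ L.toNat ≤ s.length ∧ s[L.toNat - 1]? = some '\n') := by
  intro L
  obtain ⟨hr1, hr2, -⟩ := clb_rfindFrom_spec s '\n' pos
  rcases (by omega : 0 ≤ PySem.Chars.rfindFrom s ['\n'] 0 (some pos) ∨ PySem.Chars.rfindFrom s ['\n'] 0 (some pos) < 0) with h0 | h0
  · right
    obtain ⟨ha, -, hc⟩ := hr2 h0
    refine ⟨by omega, by omega, ?_⟩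
    have : L.toNat - 1 = (PySem.Chars.rfindFrom s ['\n'] 0 (some pos)).toNat := by omega
    rw [this]; exact hc
  · left; omega

-- ===== VERDICT (by name: the statement is the Claim_ definition above) =====
theorem comment_lines_before_py_spec : Claim_equal_comment_lines_before_py := by
  intro text pos _
  unfold Spec_comment_lines_before_py comment_lines_before_py comment_lines_before_py_alt
  have hstr : PySem.Str.rfindFrom text "\n" 0 (some pos) =
      PySem.Chars.rfindFrom text.toList ['\n'] 0 (some pos) := by
    simp [PySem.Str.rfindFrom]
  set s := text.toList with hs
  set L : Int := PySem.Chars.rfindFrom s ['\n'] 0 (some pos) + 1 with hL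
  have hL0 : 0 ≤ L := by
    have := (clb_rfindFrom_spec s '\n' pos).1
    omega
  have hmain := clb_main s (L.toNat + 1) L (by omega) (clb_init s pos)
  have hslice : PySem.Chars.slice s none (some L) = s.take L.toNat := by
    rw [PySem.Chars.slice_eq_listSlice, PySem.List.slice_to s hL0]
  simp only [hstr, ← hL, hslice]
  rw [hmain.1 []]
  simp
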